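-- pv_equiv track=rewrite | github.com/samueljamesbader/DataVacuum | src/datavac/util/dag.py | include_all_descendants
-- ===== SOURCE A (Python) =====
-- from typing import Hashable, Mapping, Sequence, TypeVar
--
-- T=TypeVar('T',bound=Hashable)
--
-- def include_all_descendants(starters: list[T], graph: Mapping[T,Sequence[T]] ):
--     all_required = set()
--
--     def dfs(node):
--         all_required.add(node)
--         for des in graph.get(node, []):
--             if des not in all_required:
--                 dfs(des)
--
--     for start_node in starters: dfs(start_node)
--     return all_required
-- ===== SOURCE B (Python) =====
-- def include_all_descendants(starters, graph):
--     all_required = set()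
--     stack = list(starters)[::-1]
--     while stack:
--         node = stack.pop()
--         if node not in all_required:
--             all_required.add(node)
--             children = graph.get(node, [])
--             stack.extend(reversed(children))
--     return all_required
-- ===== Notes on version B (the rewrite author's own statement) =====
-- stated objective: alternative
-- what changed: Replaces A's recursive dfs helper (Python call stack, one frame per newly reached node) by an iterative worklist DFS: an explicit stack seeded with the starters, popping a node, and pushing its children when it is first seen.
import Mathlib
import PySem

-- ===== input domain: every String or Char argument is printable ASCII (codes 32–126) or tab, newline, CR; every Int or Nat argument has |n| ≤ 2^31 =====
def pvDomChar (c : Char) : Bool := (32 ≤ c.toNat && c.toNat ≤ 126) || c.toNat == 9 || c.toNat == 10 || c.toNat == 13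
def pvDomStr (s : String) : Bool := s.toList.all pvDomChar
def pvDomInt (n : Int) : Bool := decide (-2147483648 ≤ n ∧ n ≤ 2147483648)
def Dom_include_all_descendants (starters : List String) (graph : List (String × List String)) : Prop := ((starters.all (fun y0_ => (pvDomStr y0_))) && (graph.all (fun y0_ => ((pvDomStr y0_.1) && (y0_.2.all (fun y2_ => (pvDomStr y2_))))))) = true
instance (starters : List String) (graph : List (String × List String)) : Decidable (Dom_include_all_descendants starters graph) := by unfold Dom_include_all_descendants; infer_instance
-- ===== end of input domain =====

-- B replaces A's recursive DFS helper by an explicit-worklist (stack) DFS with the same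
-- visited-set semantics; equivalence is proved for the returned set (its element list).
-- Both ports carry a fuel parameter only to make the recursion/loop structurally total;
-- the fuel bounds are proved sufficient by the lemmas below.

-- ===== PORT A =====
-- graph.get(node, []) on the association-list dict
def pvChildren (graph : List (String × List String)) (u : String) : List String :=
  PySem.Dict.getD (PySem.Dict.mk graph) u []

-- the universe of node names occurring anywhere in the input (used only for fuel bounds)
def pvNodes (starters : List String) (graph : List (String × List String)) : PySem.Set String :=
  PySem.Set.ofList (starters ++ graph.flatMap (fun p => p.1 :: p.2))

-- A's recursive dfs: add the node, then recurse into each not-yet-seen child, in order.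
def pvDfsA (graph : List (String × List String)) : Nat → PySem.Set String → String → PySem.Set String
  | 0, V, _ => V   -- fuel exhausted (proved unreachable for the fuel used below)
  | f + 1, V, u =>
    (pvChildren graph u).foldl
      (fun W v => if PySem.Set.contains W v then W else pvDfsA graph f W v)
      (PySem.Set.add V u)

def pvFuelA (starters : List String) (graph : List (String × List String)) : Nat :=
  (pvNodes starters graph).length + 2

def include_all_descendants (starters : List String) (graph : List (String × List String)) : List String :=
  starters.foldl (fun V s => pvDfsA graph (pvFuelA starters graph) V s) PySem.Set.empty

-- ===== PORT B =====
-- Source B's stack loop; the Lean list's HEAD is the stack's top (Python's list end), so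
-- Source B's seed list(starters)[::-1] is `starters` and stack.extend(reversed(children))
-- is `pvChildren graph u ++ S`.
def pvLoopB (graph : List (String × List String)) : Nat → PySem.Set String → List String → PySem.Set String
  | 0, V, _ => V   -- fuel exhausted (proved unreachable for the fuel used below)
  | _ + 1, V, [] => V
  | f + 1, V, u :: S =>
    if PySem.Set.contains V u then pvLoopB graph f V S
    else pvLoopB graph f (PySem.Set.add V u) (pvChildren graph u ++ S)

def pvFuelB (starters : List String) (graph : List (String × List String)) : Nat :=
  starters.length + ((pvNodes starters graph).map (fun u => (pvChildren graph u).length + 1)).sum + 1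

def include_all_descendants_alt (starters : List String) (graph : List (String × List String)) : List String :=
  pvLoopB graph (pvFuelB starters graph) PySem.Set.empty starters

-- ===== PRECONDITION & SPEC =====
def Spec_include_all_descendants (starters : List String) (graph : List (String × List String)) (out : List String) : Prop := out = include_all_descendants_alt starters graph
instance (starters : List String) (graph : List (String × List String)) (out : List String) : Decidable (Spec_include_all_descendants starters graph out) := by unfold Spec_include_all_descendants; infer_instance

-- ===== CLAIM (what is proved, stated in full; the proofs are below) =====
def Claim_equal_include_all_descendants : Prop := ∀ (starters : List String) (graph : List (String × List String)), Dom_include_all_descendants starters graph → Spec_include_all_descendants starters graph (include_all_descendants starters graph)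

-- ===== LEMMAS AND PROOFS =====

-- the one-child step of A's dfs, named for the proofs
def pvStep (graph : List (String × List String)) (f : Nat) :
    PySem.Set String → String → PySem.Set String :=
  fun W v => if PySem.Set.contains W v then W else pvDfsA graph f W v

theorem pvDfsA_succ (graph : List (String × List String)) (f : Nat) (V : PySem.Set String) (u : String) :
    pvDfsA graph (f + 1) V u = (pvChildren graph u).foldl (pvStep graph f) (PySem.Set.add V u) := rfl

-- membership measure: how many universe nodes are not yet visited
def pvM (starters : List String) (graph : List (String × List String)) (V : PySem.Set String) : Nat :=
  ((pvNodes starters graph).filter (fun u => !PySem.Set.contains V u)).length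

-- work measure for B's loop fuel
def pvWork (starters : List String) (graph : List (String × List String)) (V : PySem.Set String) : Nat :=
  (((pvNodes starters graph).filter (fun u => !PySem.Set.contains V u)).map
    (fun u => (pvChildren graph u).length + 1)).sum

-- pvChildren is [] or one of the graph's association pairs
theorem pvChildren_cases (graph : List (String × List String)) (u : String) :
    pvChildren graph u = [] ∨ (u, pvChildren graph u) ∈ graph := by
  induction graph with
  | nil => left; rfl
  | cons p t ih =>
    obtain ⟨k, vs⟩ := p
    by_cases h : k = u
    · right
      subst h
      simp [pvChildren, PySem.Dict.getD_eq_get?_getD, PySem.Dict.get?_mk_cons]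
    · have heq : pvChildren ((k, vs) :: t) u = pvChildren t u := by
        simp [pvChildren, PySem.Dict.getD_eq_get?_getD, PySem.Dict.get?_mk_cons, h]
      rw [heq]
      rcases ih with h1 | h1
      · left; exact h1
      · right; exact List.mem_cons_of_mem _ h1

-- every child list is contained in the universe
theorem pvChildren_mem_nodes (starters : List String) (graph : List (String × List String))
    (u v : String) (hv : v ∈ pvChildren graph u) : v ∈ pvNodes starters graph := by
  rcases pvChildren_cases graph u with h | h
  · rw [h] at hv; cases hv
  · simp only [pvNodes, PySem.Set.mem_ofList, List.mem_append, List.mem_flatMap]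
    right
    exact ⟨(u, pvChildren graph u), h, List.mem_cons_of_mem _ hv⟩

theorem pvStarters_mem_nodes (starters : List String) (graph : List (String × List String))
    (s : String) (hs : s ∈ starters) : s ∈ pvNodes starters graph := by
  simp only [pvNodes, PySem.Set.mem_ofList, List.mem_append]
  exact Or.inl hs

-- visiting a fresh universe node moves the unvisited part of the universe by exactly that node
theorem pvFilter_add_perm (V : PySem.Set String) (u : String) (L : List String)
    (hnd : L.Nodup) (hu : u ∈ L) (hnv : u ∉ V) :
    (L.filter (fun x => !PySem.Set.contains V x)).Perm
      (u :: L.filter (fun x => !PySem.Set.contains (PySem.Set.add V u) x)) := by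
  induction L with
  | nil => cases hu
  | cons h t ih =>
    have hnd' : h ∉ t ∧ t.Nodup := by simpa [List.nodup_cons] using hnd
    by_cases hhu : h = u
    · subst hhu
      have hut : h ∉ t := hnd'.1
      have hpv : (!PySem.Set.contains V h) = true := by simp [hnv]
      have hq : (!PySem.Set.contains (PySem.Set.add V h) h) = false := by
        simp [PySem.Set.mem_add]
      have hcong : t.filter (fun x => !PySem.Set.contains (PySem.Set.add V h) x)
          = t.filter (fun x => !PySem.Set.contains V x) := by
        apply List.filter_congr
        intro x hx
        have hxh : x ≠ h := fun e => hut (e ▸ hx)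
        simp [PySem.Set.mem_add, hxh]
      simp only [List.filter_cons, hpv, hq, Bool.false_eq_true, if_true, if_false, hcong]
      exact List.Perm.refl _
    · have hut : u ∈ t := by
        rcases List.mem_cons.mp hu with hu1 | hu1
        · exact absurd hu1.symm hhu
        · exact hu1
      have hq : (!PySem.Set.contains (PySem.Set.add V u) h)
          = (!PySem.Set.contains V h) := by
        simp [PySem.Set.mem_add, hhu]
      have ihp := ih hnd'.2 hut
      by_cases hh : (!PySem.Set.contains V h) = true
      · simp only [List.filter_cons, hh, hq]
        exact (ihp.cons h).trans (List.Perm.swap u h _)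
      · simp only [Bool.not_eq_true] at hh
        simp only [List.filter_cons, hh, hq, Bool.false_eq_true, ite_false]
        simpa using ihp

theorem pvM_add (starters : List String) (graph : List (String × List String))
    (V : PySem.Set String) (u : String) (hu : u ∈ pvNodes starters graph) (hnv : u ∉ V) :
    pvM starters graph V = pvM starters graph (PySem.Set.add V u) + 1 := by
  have hp := pvFilter_add_perm V u (pvNodes starters graph)
    (PySem.Set.nodup_ofList _) hu hnv
  simpa [pvM] using hp.length_eq

theorem pvWork_add (starters : List String) (graph : List (String × List String))
    (V : PySem.Set String) (u : String) (hu : u ∈ pvNodes starters graph) (hnv : u ∉ V) :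
    pvWork starters graph V
      = pvWork starters graph (PySem.Set.add V u) + ((pvChildren graph u).length + 1) := by
  have hp := pvFilter_add_perm V u (pvNodes starters graph)
    (PySem.Set.nodup_ofList _) hu hnv
  have := (hp.map (fun u => (pvChildren graph u).length + 1)).sum_nat
  simpa [pvWork, Nat.add_comm] using this

theorem pvM_mono (starters : List String) (graph : List (String × List String))
    (V W : PySem.Set String) (h : ∀ x, x ∈ V → x ∈ W) :
    pvM starters graph W ≤ pvM starters graph V := by
  simp only [pvM, ← List.countP_eq_length_filter]
  apply List.countP_mono_left
  intro a _ ha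
  simp only [Bool.not_eq_eq_eq_not, Bool.not_true] at *
  simp only [PySem.Set.contains_eq_listContains, List.contains_eq_mem, decide_eq_false_iff_not] at *
  exact fun hv => ha (h a hv)

-- dfs only ever adds to the visited set
theorem pvMem_dfsA (graph : List (String × List String)) :
    ∀ (f : Nat) (V : PySem.Set String) (u x : String), x ∈ V → x ∈ pvDfsA graph f V u := by
  intro f
  induction f with
  | zero => intro V u x hx; exact hx
  | succ f ih =>
    intro V u x hx
    rw [pvDfsA_succ]
    have hstart : x ∈ PySem.Set.add V u := by
      simp [PySem.Set.mem_add]; exact Or.inl hx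
    generalize PySem.Set.add V u = W at hstart ⊢
    induction pvChildren graph u generalizing W with
    | nil => exact hstart
    | cons c cs ihc =>
      simp only [List.foldl_cons]
      apply ihc
      unfold pvStep
      split
      · exact hstart
      · exact ih W c x hstart

-- A's dfs does not depend on the fuel, as long as the fuel exceeds the measure
theorem pvDfsA_fuel (starters : List String) (graph : List (String × List String)) :
    ∀ (a : Nat), (∀ (b : Nat) (V : PySem.Set String) (u : String),
      u ∈ pvNodes starters graph → u ∉ V →
      pvM starters graph V < a → pvM starters graph V < b →
      pvDfsA graph a V u = pvDfsA graph b V u)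
    ∧ (∀ (b : Nat) (cs : List String), (∀ c ∈ cs, c ∈ pvNodes starters graph) →
      ∀ (W : PySem.Set String), pvM starters graph W < a → pvM starters graph W < b →
      cs.foldl (pvStep graph a) W = cs.foldl (pvStep graph b) W) := by
  intro a
  induction a using Nat.strong_induction_on with
  | _ a IH =>
    have part1 : ∀ (b : Nat) (V : PySem.Set String) (u : String),
        u ∈ pvNodes starters graph → u ∉ V →
        pvM starters graph V < a → pvM starters graph V < b →
        pvDfsA graph a V u = pvDfsA graph b V u := by
      intro b V u hu hnv ha hb
      cases a with
      | zero => omega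
      | succ a' =>
        cases b with
        | zero => omega
        | succ b' =>
          rw [pvDfsA_succ, pvDfsA_succ]
          have hm := pvM_add starters graph V u hu hnv
          have ha' : pvM starters graph (PySem.Set.add V u) < a' := by omega
          have hb' : pvM starters graph (PySem.Set.add V u) < b' := by omega
          exact (IH a' (Nat.lt_succ_self a')).2 b' (pvChildren graph u)
            (fun c hc => pvChildren_mem_nodes starters graph u c hc)
            (PySem.Set.add V u) ha' hb'
    refine ⟨part1, ?_⟩
    intro b cs
    induction cs with
    | nil => intro _ W _ _; rfl
    | cons c cs ihc =>
      intro hcs W ha hb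
      simp only [List.foldl_cons]
      by_cases hc : c ∈ W
      · have h1 : pvStep graph a W c = W := by
          unfold pvStep; simp [hc]
        have h2 : pvStep graph b W c = W := by
          unfold pvStep; simp [hc]
        rw [h1, h2]
        exact ihc (fun x hx => hcs x (List.mem_cons_of_mem _ hx)) W ha hb
      · have heq : pvDfsA graph a W c = pvDfsA graph b W c :=
          part1 b W c (hcs c List.mem_cons_self) hc ha hb
        have h1 : pvStep graph a W c = pvDfsA graph a W c := by
          unfold pvStep; simp [hc]
        have h2 : pvStep graph b W c = pvDfsA graph b W c := by
          unfold pvStep; simp [hc]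
        rw [h1, h2, ← heq]
        have hsub : ∀ x, x ∈ W → x ∈ pvDfsA graph a W c :=
          fun x hx => pvMem_dfsA graph a W c x hx
        have hmle := pvM_mono starters graph W (pvDfsA graph a W c) hsub
        exact ihc (fun x hx => hcs x (List.mem_cons_of_mem _ hx)) _
          (by omega) (by omega)

-- visited sets stay closed (children of finished nodes are visited), except on the pending path
def pvClosedE (graph : List (String × List String)) (V : PySem.Set String) (P : List String) : Prop :=
  ∀ w ∈ V, w ∉ P → ∀ c ∈ pvChildren graph w, c ∈ V

theorem pvDfsA_closed (starters : List String) (graph : List (String × List String)) :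
    ∀ (f : Nat) (V : PySem.Set String) (u : String) (P : List String),
      u ∈ pvNodes starters graph → u ∉ V → pvM starters graph V < f →
      pvClosedE graph V P →
      pvClosedE graph (pvDfsA graph f V u) P
        ∧ (∀ c ∈ pvChildren graph u, c ∈ pvDfsA graph f V u)
        ∧ u ∈ pvDfsA graph f V u := by
  intro f
  induction f using Nat.strong_induction_on with
  | _ f IH =>
    intro V u P hu hnv hf hcl
    cases f with
    | zero => omega
    | succ f' =>
      rw [pvDfsA_succ]
      have hm := pvM_add starters graph V u hu hnv
      have hW0cl : pvClosedE graph (PySem.Set.add V u) (u :: P) := by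
        intro w hw hwp c hc
        rcases (PySem.Set.mem_add V u w).mp hw with hw1 | hw1
        · have hwp' : w ∉ P := fun h => hwp (List.mem_cons_of_mem _ h)
          exact (PySem.Set.mem_add V u c).mpr (Or.inl (hcl w hw1 hwp' c hc))
        · exact absurd (List.mem_cons_self) (hw1 ▸ hwp)
      have hW0m : pvM starters graph (PySem.Set.add V u) < f' := by omega
      have inner : ∀ (cs : List String), (∀ c ∈ cs, c ∈ pvNodes starters graph) →
          ∀ (W : PySem.Set String), pvClosedE graph W (u :: P) →
            pvM starters graph W < f' →
            pvClosedE graph (cs.foldl (pvStep graph f') W) (u :: P)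
              ∧ (∀ c ∈ cs, c ∈ cs.foldl (pvStep graph f') W)
              ∧ (∀ x ∈ W, x ∈ cs.foldl (pvStep graph f') W) := by
        intro cs
        induction cs with
        | nil => intro _ W hWcl _; exact ⟨hWcl, by simp, fun x hx => hx⟩
        | cons c t iht =>
          intro hcs W hWcl hWm
          simp only [List.foldl_cons]
          by_cases hc : c ∈ W
          · have h1 : pvStep graph f' W c = W := by unfold pvStep; simp [hc]
            rw [h1]
            obtain ⟨r1, r2, r3⟩ := iht (fun x hx => hcs x (List.mem_cons_of_mem _ hx)) W hWcl hWm
            exact ⟨r1, by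
              intro x hx
              rcases List.mem_cons.mp hx with hx1 | hx1
              · exact hx1 ▸ r3 c hc
              · exact r2 x hx1, r3⟩
          · have h1 : pvStep graph f' W c = pvDfsA graph f' W c := by unfold pvStep; simp [hc]
            rw [h1]
            obtain ⟨o1, _, o3⟩ := IH f' (Nat.lt_succ_self f') W c (u :: P)
              (hcs c List.mem_cons_self) hc hWm hWcl
            have hsub : ∀ x ∈ W, x ∈ pvDfsA graph f' W c :=
              fun x hx => pvMem_dfsA graph f' W c x hx
            have hmle := pvM_mono starters graph W (pvDfsA graph f' W c) hsub
            obtain ⟨r1, r2, r3⟩ := iht (fun x hx => hcs x (List.mem_cons_of_mem _ hx))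
              (pvDfsA graph f' W c) o1 (by omega)
            exact ⟨r1, by
              intro x hx
              rcases List.mem_cons.mp hx with hx1 | hx1
              · exact hx1 ▸ r3 c o3
              · exact r2 x hx1, fun x hx => r3 x (hsub x hx)⟩
      obtain ⟨r1, r2, r3⟩ := inner (pvChildren graph u)
        (fun c hc => pvChildren_mem_nodes starters graph u c hc)
        (PySem.Set.add V u) hW0cl hW0m
      have huR : u ∈ (pvChildren graph u).foldl (pvStep graph f') (PySem.Set.add V u) :=
        r3 u ((PySem.Set.mem_add V u u).mpr (Or.inr rfl))
      refine ⟨?_, r2, huR⟩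
      intro w hw hwp c hc
      by_cases hwu : w = u
      · subst hwu
        exact r2 c hc
      · exact r1 w hw (by
          intro hmem
          rcases List.mem_cons.mp hmem with h1 | h1
          · exact hwu h1
          · exact hwp h1) c hc

-- on a closed visited set, re-running dfs from a visited node is the identity
theorem pvDfsA_skip (graph : List (String × List String)) (f : Nat)
    (V : PySem.Set String) (u : String) (hcl : pvClosedE graph V []) (hu : u ∈ V) :
    pvDfsA graph f V u = V := by
  cases f with
  | zero => rfl
  | succ f' =>
    rw [pvDfsA_succ, PySem.Set.add_of_mem hu]
    have hch : ∀ c ∈ pvChildren graph u, c ∈ V :=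
      fun c hc => hcl u hu (by simp) c hc
    generalize pvChildren graph u = cs at hch
    induction cs with
    | nil => rfl
    | cons c t iht =>
      simp only [List.foldl_cons]
      have h1 : pvStep graph f' V c = V := by
        unfold pvStep; simp [hch c List.mem_cons_self]
      rw [h1]
      exact iht (fun x hx => hch x (List.mem_cons_of_mem _ hx))

-- B's stack loop is A's checked dfs fold, for sufficient fuel
theorem pvLoopB_eq_fold (starters : List String) (graph : List (String × List String)) :
    ∀ (fB : Nat) (S : List String) (V : PySem.Set String),
      (∀ s ∈ S, s ∈ pvNodes starters graph) →
      S.length + pvWork starters graph V + 1 ≤ fB →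
      pvLoopB graph fB V S
        = S.foldl (pvStep graph (pvFuelA starters graph)) V := by
  intro fB
  induction fB using Nat.strong_induction_on with
  | _ fB IH =>
    intro S V hS hfuel
    cases fB with
    | zero => omega
    | succ f =>
      cases S with
      | nil => rfl
      | cons u S' =>
        by_cases hu : u ∈ V
        · have hc : PySem.Set.contains V u = true := by simp [hu]
          have hl : pvLoopB graph (f + 1) V (u :: S') = pvLoopB graph f V S' := by
            simp only [pvLoopB, hc, if_true]
          have hstep : pvStep graph (pvFuelA starters graph) V u = V := by
            unfold pvStep; simp [hu]
          rw [hl, List.foldl_cons, hstep]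
          exact IH f (Nat.lt_succ_self f) S' V
            (fun x hx => hS x (List.mem_cons_of_mem _ hx))
            (by simp only [List.length_cons] at hfuel; omega)
        · have hc : PySem.Set.contains V u = false := by simp [hu]
          have hl : pvLoopB graph (f + 1) V (u :: S')
              = pvLoopB graph f (PySem.Set.add V u) (pvChildren graph u ++ S') := by
            simp only [pvLoopB, hc, Bool.false_eq_true, if_false]
          have huU : u ∈ pvNodes starters graph := hS u List.mem_cons_self
          have hw := pvWork_add starters graph V u huU hu
          have hlen : (pvChildren graph u ++ S').length
              + pvWork starters graph (PySem.Set.add V u) + 1 ≤ f := by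
            simp only [List.length_append]
            simp only [List.length_cons] at hfuel
            omega
          rw [hl, IH f (Nat.lt_succ_self f) _ _ (by
              intro x hx
              rcases List.mem_append.mp hx with hx1 | hx1
              · exact pvChildren_mem_nodes starters graph u x hx1
              · exact hS x (List.mem_cons_of_mem _ hx1)) hlen,
            List.foldl_append]
          have hstep : pvStep graph (pvFuelA starters graph) V u
              = pvDfsA graph (pvFuelA starters graph) V u := by
            unfold pvStep; simp [hu]
          rw [List.foldl_cons, hstep]
          congr 1
          have hm := pvM_add starters graph V u huU hu
          have hle : pvM starters graph V ≤ (pvNodes starters graph).length :=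
            List.length_filter_le _ _
          have hNsucc : pvFuelA starters graph = ((pvNodes starters graph).length + 1) + 1 := rfl
          rw [hNsucc, pvDfsA_succ]
          exact ((pvDfsA_fuel starters graph ((pvNodes starters graph).length + 1 + 1)).2
            ((pvNodes starters graph).length + 1) (pvChildren graph u)
            (fun c hc => pvChildren_mem_nodes starters graph u c hc)
            (PySem.Set.add V u) (by omega) (by omega))

-- A's unchecked top-level fold equals the checked fold, on closed visited sets
theorem pvTop_eq (starters : List String) (graph : List (String × List String)) :
    ∀ (S : List String), (∀ s ∈ S, s ∈ pvNodes starters graph) →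
      ∀ (V : PySem.Set String), pvClosedE graph V [] →
      S.foldl (fun V s => pvDfsA graph (pvFuelA starters graph) V s) V
        = S.foldl (pvStep graph (pvFuelA starters graph)) V := by
  intro S
  induction S with
  | nil => intro _ V _; rfl
  | cons s S' ih =>
    intro hS V hcl
    simp only [List.foldl_cons]
    by_cases hs : s ∈ V
    · have hskip := pvDfsA_skip graph (pvFuelA starters graph) V s hcl hs
      have hstep : pvStep graph (pvFuelA starters graph) V s = V := by
        unfold pvStep; simp [hs]
      rw [hskip, hstep]
      exact ih (fun x hx => hS x (List.mem_cons_of_mem _ hx)) V hcl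
    · have hstep : pvStep graph (pvFuelA starters graph) V s
          = pvDfsA graph (pvFuelA starters graph) V s := by
        unfold pvStep; simp [hs]
      rw [hstep]
      have hle : pvM starters graph V ≤ (pvNodes starters graph).length :=
        List.length_filter_le _ _
      have hcl' := (pvDfsA_closed starters graph (pvFuelA starters graph) V s []
        (hS s List.mem_cons_self) hs (by simp [pvFuelA]; omega) hcl).1
      exact ih (fun x hx => hS x (List.mem_cons_of_mem _ hx)) _ hcl'

-- ===== VERDICT (by name: the statement is the Claim_ definition above) =====
theorem include_all_descendants_spec : Claim_equal_include_all_descendants := by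
  intro starters graph _hdom
  unfold Spec_include_all_descendants include_all_descendants include_all_descendants_alt
  have hS : ∀ s ∈ starters, s ∈ pvNodes starters graph :=
    fun s hs => pvStarters_mem_nodes starters graph s hs
  have hcl0 : pvClosedE graph PySem.Set.empty [] := by
    intro w hw
    cases hw
  have hwork0 : pvWork starters graph PySem.Set.empty
      = ((pvNodes starters graph).map (fun u => (pvChildren graph u).length + 1)).sum := by
    have hfilt : (pvNodes starters graph).filter
        (fun u => !PySem.Set.contains PySem.Set.empty u) = pvNodes starters graph := by
      apply List.filter_eq_self.mpr
      intro a _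
      simp [PySem.Set.empty]
    unfold pvWork
    rw [hfilt]
  rw [pvTop_eq starters graph starters hS PySem.Set.empty hcl0,
    pvLoopB_eq_fold starters graph (pvFuelB starters graph) starters PySem.Set.empty hS
      (le_of_eq (by unfold pvFuelB; rw [hwork0]))]
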